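-- pv_equiv track=rewrite | github.com/securesystemslab/zippy | zippy/edu.uci.python.test/src/tests/generator-inline-genexp-localvar-test.py | call_generator_localvar
-- ===== SOURCE A (Python) =====
-- def call_generator_localvar(num, iteration):
-- 	item = 0
-- 	for t in range(iteration):
-- 		num += t % 5
-- 		ge = (x * 2 for x in range(num))
-- 		for i in ge:
-- 			item = i + item % 5
--
-- 	return item
-- ===== SOURCE B (Python) =====
-- def call_generator_localvar(num, iteration):
--     # Closed form for A's inner loop over range(num): only item % 5 propagates
--     # through the recurrence item = 2*x + item % 5, and that residue advances by
--     # (num-2)*(num-1) mod 5, so each outer step costs O(1).  The outer loop is a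
--     # while loop maintaining the residue t % 5 incrementally instead of range().
--     item = 0
--     t = 0
--     r = 0
--     while t < iteration:
--         num += r
--         if num >= 2:
--             item = (item + (num - 2) * (num - 1)) % 5 + 2 * (num - 1)
--         elif num == 1:
--             item %= 5
--         t += 1
--         r = r + 1 if r < 4 else 0
--     return item
-- ===== Notes on version B (the rewrite author's own statement) =====
-- stated objective: faster
-- what changed: A's inner loop over range(num) is replaced by an O(1) closed form (only item%5 propagates, advancing by (num-2)*(num-1) mod 5), and the outer for/range loop becomes a while loop that maintains t%5 incrementally.
import Mathlib
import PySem

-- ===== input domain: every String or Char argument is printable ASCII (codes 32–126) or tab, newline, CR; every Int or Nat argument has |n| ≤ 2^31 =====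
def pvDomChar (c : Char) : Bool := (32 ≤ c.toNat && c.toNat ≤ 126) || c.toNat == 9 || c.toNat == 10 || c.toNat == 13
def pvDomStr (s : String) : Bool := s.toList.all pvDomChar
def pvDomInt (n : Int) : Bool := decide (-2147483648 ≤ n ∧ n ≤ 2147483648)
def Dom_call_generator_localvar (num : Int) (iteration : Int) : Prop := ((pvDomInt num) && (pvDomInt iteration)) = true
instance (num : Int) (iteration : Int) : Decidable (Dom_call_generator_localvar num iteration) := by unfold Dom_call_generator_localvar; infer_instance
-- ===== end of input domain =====

-- B replaces A's inner loop over range(num) by an O(1) closed form (only item%5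
-- propagates through the inner recurrence), making the whole run O(iteration).

-- ===== PORT A =====
-- inner 'for i in ge: item = i + item % 5' body
def pvInnerStep (item : Int) (x : Int) : Int := x * 2 + PySem.Int.mod item 5
-- the whole inner loop 'ge = (x*2 for x in range(num)); for i in ge: …'
def pvInner (item : Int) (n : Int) : Int :=
  (PySem.List.pyRange 0 n 1).foldl pvInnerStep item

def call_generator_localvar (num : Int) (iteration : Int) : Int :=
  ((PySem.List.pyRange 0 iteration 1).foldl
    (fun (st : Int × Int) t =>
      let num' := st.1 + PySem.Int.mod t 5
      (num', pvInner st.2 num')) (num, 0)).2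

-- ===== PORT B =====
-- one outer step's closed-form item update (Source B's if/elif)
def pvAltUpd (item : Int) (n : Int) : Int :=
  if 2 ≤ n then PySem.Int.mod (item + (n - 2) * (n - 1)) 5 + 2 * (n - 1)
  else if n = 1 then PySem.Int.mod item 5
  else item

-- Source B's while loop: rem = number of remaining steps, r = t % 5 maintained incrementally
def pvAltLoop : Nat → Int → Int → Int → Int
  | 0, _, _, item => item
  | Nat.succ rem, r, n, item =>
      pvAltLoop rem (if r < 4 then r + 1 else 0) (n + r) (pvAltUpd item (n + r))

def call_generator_localvar_alt (num : Int) (iteration : Int) : Int :=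
  pvAltLoop iteration.toNat 0 num 0

-- ===== PRECONDITION & SPEC =====
def Spec_call_generator_localvar (num : Int) (iteration : Int) (out : Int) : Prop := out = call_generator_localvar_alt num iteration
instance (num : Int) (iteration : Int) (out : Int) : Decidable (Spec_call_generator_localvar num iteration out) := by unfold Spec_call_generator_localvar; infer_instance

-- ===== CLAIM (what is proved, stated in full; the proofs are below) =====
def Claim_equal_call_generator_localvar : Prop := ∀ (num : Int) (iteration : Int), Dom_call_generator_localvar num iteration → Spec_call_generator_localvar num iteration (call_generator_localvar num iteration)

-- ===== LEMMAS AND PROOFS =====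

-- Nat-indexed version of the inner loop, for induction
def pvInnerN (item : Int) (k : Nat) : Int :=
  ((List.range k).map Int.ofNat).foldl pvInnerStep item

theorem pvInner_natCast (item : Int) (k : Nat) : pvInner item (k : Int) = pvInnerN item k := by
  rw [pvInner, PySem.List.pyRange_zero_natCast]
  rfl

theorem pvInnerN_succ (item : Int) (k : Nat) :
    pvInnerN item (k + 1) = pvInnerStep (pvInnerN item k) (k : Int) := by
  simp [pvInnerN, List.range_succ]

-- only item % 5 propagates: the residue advances by (k-1)*k mod 5
theorem pvInnerN_mod5 (k : Nat) (item : Int) :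
    PySem.Int.mod (pvInnerN item k) 5 =
    PySem.Int.mod (item + ((k : Int) - 1) * (k : Int)) 5 := by
  induction k generalizing item with
  | zero => simp [pvInnerN]
  | succ k ih =>
    rw [pvInnerN_succ, pvInnerStep, ih]
    rw [PySem.Int.mod_eq_emod_of_pos (by norm_num),
        PySem.Int.mod_eq_emod_of_pos (by norm_num),
        PySem.Int.mod_eq_emod_of_pos (by norm_num)]
    have h : item + ((k : Int) + 1 - 1) * ((k : Int) + 1)
        = (item + ((k : Int) - 1) * (k : Int)) + 2 * (k : Int) := by ring
    push_cast
    rw [h]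
    generalize item + ((k : Int) - 1) * (k : Int) = c
    omega

theorem pvInnerN_closed (k : Nat) (item : Int) (h : 2 ≤ k) :
    pvInnerN item k =
    PySem.Int.mod (item + ((k : Int) - 2) * ((k : Int) - 1)) 5 + 2 * ((k : Int) - 1) := by
  obtain ⟨j, rfl⟩ : ∃ j, k = j + 1 := ⟨k - 1, by omega⟩
  rw [pvInnerN_succ, pvInnerStep, pvInnerN_mod5]
  push_cast
  ring_nf

theorem pvInner_eq_upd (item n : Int) : pvInner item n = pvAltUpd item n := by
  rcases (by omega : n ≤ 0 ∨ 0 < n) with hn | hn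
  · have hr : PySem.List.pyRange 0 n 1 = [] := by
      rw [PySem.List.pyRange_of_pos 0 n (by norm_num : (0:Int) < 1), if_neg (by omega)]
      simp
    rw [pvAltUpd, if_neg (by omega), if_neg (by omega)]
    simp [pvInner, hr]
  · obtain ⟨k, rfl⟩ : ∃ k : Nat, n = (k : Int) :=
      ⟨n.toNat, (Int.toNat_of_nonneg hn.le).symm⟩
    rw [pvInner_natCast]
    rcases Nat.lt_or_ge k 2 with hk | hk
    · interval_cases k
      · simp at hn
      · simp [pvInnerN, pvAltUpd, pvInnerStep, List.range_succ]
    · rw [pvInnerN_closed k item hk, pvAltUpd,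
        if_pos (by exact_mod_cast hk)]

-- A's outer-loop body
def pvOuterStep (st : Int × Int) (t : Int) : Int × Int :=
  let num' := st.1 + PySem.Int.mod t 5
  (num', pvInner st.2 num')

-- B's while loop, started at step index t with r = t % 5, equals A's fold over [t, …, t+rem-1]
theorem pvAltLoop_eq_fold (rem : Nat) : ∀ (t : Nat) (n item : Int),
    pvAltLoop rem (((t % 5 : Nat) : Int)) n item
    = (((List.range' t rem).map Int.ofNat).foldl pvOuterStep (n, item)).2 := by
  induction rem with
  | zero => intro t n item; simp [pvAltLoop]
  | succ rem ih =>
    intro t n item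
    have hmod : PySem.Int.mod (Int.ofNat t) 5 = ((t % 5 : Nat) : Int) := by
      rw [PySem.Int.mod_eq_emod_of_pos (by norm_num)]
      simp only [Int.ofNat_eq_natCast]
      omega
    have hnext : (if ((t % 5 : Nat) : Int) < 4 then ((t % 5 : Nat) : Int) + 1 else 0)
        = (((t + 1) % 5 : Nat) : Int) := by
      rcases (by omega : t % 5 < 4 ∨ t % 5 = 4) with h | h
      · rw [if_pos (by exact_mod_cast h)]
        omega
      · rw [if_neg (by omega)]
        omega
    rw [List.range'_succ, List.map_cons, List.foldl_cons, pvAltLoop, hnext, ih (t + 1)]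
    simp only [pvOuterStep, hmod, pvInner_eq_upd]

theorem alt_eq_A (num iteration : Int) :
    call_generator_localvar num iteration = call_generator_localvar_alt num iteration := by
  unfold call_generator_localvar call_generator_localvar_alt
  rcases (by omega : iteration ≤ 0 ∨ 0 < iteration) with hi | hi
  · have h0 : iteration.toNat = 0 := by omega
    have hr : PySem.List.pyRange 0 iteration 1 = [] := by
      rw [PySem.List.pyRange_of_pos 0 iteration (by norm_num : (0:Int) < 1), if_neg (by omega)]
      simp
    rw [h0, hr]
    rfl
  · obtain ⟨k, hk⟩ : ∃ k : Nat, iteration = (k : Int) :=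
      ⟨iteration.toNat, (Int.toNat_of_nonneg hi.le).symm⟩
    subst hk
    rw [PySem.List.pyRange_zero_natCast, Int.toNat_natCast]
    have := pvAltLoop_eq_fold k 0 num 0
    simp only [Nat.zero_mod, Nat.cast_zero] at this
    rw [this, ← List.range_eq_range']
    rfl

-- ===== VERDICT (by name: the statement is the Claim_ definition above) =====
theorem call_generator_localvar_spec : Claim_equal_call_generator_localvar := by
  intro num iteration _
  exact alt_eq_A num iteration
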